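-- pv_equiv track=rewrite | github.com/TimberZZ/Sentiment-Analyse | utils/DocAnalyzer.py | extract_conns_with_entities
-- ===== SOURCE A (Python) =====
-- def extract_conns_with_entities(chapter, entities_set):
--     '''
--
--     :param chapter:chapter waiting to be processed, a list of sentences,entities_set contains entities we care about
--     :return: characters, connections
--     '''
--     title = chapter[0]
--     paragraphs = chapter[1:]
--
--     entities = [([entity for entity in entities_set if entity.split()[0].lower() in paragraph.lower()], paragraph) for paragraph in paragraphs]
--
--     entities = [pair for pair in entities if len(pair[0]) != 0]
--
--     connections = {}
--     for pair in entities: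
--         entity = set(pair[0])
--         if len(entity) <= 1:
--             continue
--         entity = list(entity)
--         for ind in range(0, len(entity)):
--             for other_ind in range(ind + 1, len(entity)):
--                 a = entity[ind]
--                 b = entity[other_ind]
--                 if a not in connections:
--                     connections[a] = {}
--                 if b not in connections[a]:
--                     connections[a][b] = 0
--                 connections[a][b] += 1
--
--                 if b not in connections:
--                     connections[b] = {}
--                 if a not in connections[b]:
--                     connections[b][a] = 0
--                 connections[b][a] += 1
--
--     return connections
-- ===== SOURCE B (Python) =====
-- def extract_conns_with_entities(chapter, entities_set):
--     # B: materialize a flat list of directed co-occurrence EVENTS with comprehensions,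
--     # then assign each distinct pair's count once via list.count -- no incremental
--     # nested-dict mutation, no membership checks, no per-paragraph guards (empty or
--     # single-entity paragraphs simply contribute no events).
--     paragraphs = chapter[1:]
--     detected = [list(dict.fromkeys(e for e in entities_set
--                                    if e.split()[0].lower() in p.lower()))
--                 for p in paragraphs]
--     events = [pr
--               for ent in detected
--               for i, a in enumerate(ent)
--               for b in ent[i + 1:]
--               for pr in ((a, b), (b, a))]
--     connections = {}
--     for a, b in dict.fromkeys(events):
--         connections.setdefault(a, {})[b] = events.count((a, b))
--     return connections
-- ===== Notes on version B (the rewrite author's own statement) =====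
-- stated objective: alternative
-- what changed: A streams pair events into the nested dict with membership checks and in-place increments; B instead materializes the flat list of all directed co-occurrence events with comprehensions, dedups it, and assigns each distinct pair once as connections[a][b] = events.count((a,b)) -- counting by list multiplicity, no increments, no dict counters, and no per-paragraph guards.
import Mathlib
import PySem

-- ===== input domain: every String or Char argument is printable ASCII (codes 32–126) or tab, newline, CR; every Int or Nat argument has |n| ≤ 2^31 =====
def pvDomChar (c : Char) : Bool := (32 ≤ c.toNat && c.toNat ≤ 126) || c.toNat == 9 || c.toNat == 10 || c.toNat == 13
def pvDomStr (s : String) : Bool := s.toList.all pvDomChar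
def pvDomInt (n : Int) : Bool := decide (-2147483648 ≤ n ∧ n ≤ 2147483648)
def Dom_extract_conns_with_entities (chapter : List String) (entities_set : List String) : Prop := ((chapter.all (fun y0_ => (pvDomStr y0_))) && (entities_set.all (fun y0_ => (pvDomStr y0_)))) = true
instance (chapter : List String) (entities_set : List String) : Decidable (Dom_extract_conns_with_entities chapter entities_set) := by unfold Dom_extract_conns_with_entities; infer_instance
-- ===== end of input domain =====

-- B replaces A's incremental nested-dict building (membership checks + in-place increments while
-- enumerating index pairs) by materializing the flat list of all directed co-occurrence events and
-- assigning each distinct pair once via list.count (objective: alternative; not claimed faster).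
-- Equivalence is about the return value; in Python A's output key ORDER depends on set() iteration
-- order (outputs are compared as dicts, ignoring order); the Lean ports both use first-occurrence order.

-- ===== PORT A =====
-- connections[a][b] gets created (if needed) and incremented; a Python dict cell update.
def pvBumpA (c : PySem.Dict String (PySem.Dict String Int)) (a b : String) :
    PySem.Dict String (PySem.Dict String Int) :=
  let c1 := if c.contains a then c else c.insert a PySem.Dict.empty      -- if a not in connections: connections[a] = {}
  let inner := c1.getD a PySem.Dict.empty                                 -- connections[a]
  let inner1 := if inner.contains b then inner else inner.insert b 0     -- if b not in connections[a]: connections[a][b] = 0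
  c1.insert a (inner1.modify b 0 (· + 1))                                 -- connections[a][b] += 1

def extract_conns_with_entities (chapter : List String) (entities_set : List String) :
    List (String × List (String × Int)) :=
  -- title = chapter[0] (unused; chapter ≠ [] is part of Pre_)
  let paragraphs := PySem.List.slice chapter (some 1) none
  let entities := paragraphs.map (fun paragraph =>
    (entities_set.filter (fun entity =>
        PySem.Str.isIn (PySem.Str.lower ((PySem.Str.split₀ entity).headD ""))
          (PySem.Str.lower paragraph)), paragraph))
  let entities := entities.filter (fun pair => pair.1.length != 0)
  let connections := entities.foldl (fun connections pair =>
    let entity : List String := PySem.Set.ofList pair.1                   -- entity = list(set(pair[0]))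
    if entity.length ≤ 1 then connections
    else
      (PySem.List.pyRange 0 (entity.length : Int) 1).foldl (fun connections ind =>
        (PySem.List.pyRange (ind + 1) (entity.length : Int) 1).foldl (fun connections other_ind =>
          let a := PySem.List.pyGetD entity ind ""
          let b := PySem.List.pyGetD entity other_ind ""
          pvBumpA (pvBumpA connections a b) b a) connections) connections)
    (PySem.Dict.empty : PySem.Dict String (PySem.Dict String Int))
  connections.items.map (fun p => (p.1, p.2.items))

-- ===== PORT B =====
def extract_conns_with_entities_alt (chapter : List String) (entities_set : List String) :
    List (String × List (String × Int)) :=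
  let paragraphs := PySem.List.slice chapter (some 1) none
  -- detected = [list(dict.fromkeys(e for e in entities_set if ...)) for p in paragraphs]
  let detected := paragraphs.map (fun p =>
    PySem.List.dedup (entities_set.filter (fun e =>
      PySem.Str.isIn (PySem.Str.lower ((PySem.Str.split₀ e).headD ""))
        (PySem.Str.lower p))))
  -- events = [pr for ent in detected for i, a in enumerate(ent) for b in ent[i+1:] for pr in ((a,b),(b,a))]
  let events := detected.flatMap (fun ent =>
    (PySem.List.enumerate ent).flatMap (fun ia =>
      (PySem.List.slice ent (some (ia.1 + 1)) none).flatMap (fun b =>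
        [(ia.2, b), (b, ia.2)])))
  -- for a, b in dict.fromkeys(events): connections.setdefault(a, {})[b] = events.count((a, b))
  let connections := (PySem.List.dedup events).foldl (fun connections pr =>
    let connections := connections.setdefault pr.1 PySem.Dict.empty
    connections.insert pr.1
      ((connections.getD pr.1 PySem.Dict.empty).insert pr.2
        ((PySem.List.count events (pr.1, pr.2) : Int))))
    (PySem.Dict.empty : PySem.Dict String (PySem.Dict String Int))
  connections.items.map (fun p => (p.1, p.2.items))

-- ===== PRECONDITION & SPEC =====
-- Pre_ excludes exactly the inputs where Python A raises: chapter == [] (IndexError on chapter[0]),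
-- and chapters with at least one paragraph when entities_set contains a whitespace-only/empty string
-- (entity.split()[0] raises IndexError).
def Pre_extract_conns_with_entities (chapter : List String) (entities_set : List String) : Prop :=
  chapter ≠ [] ∧ (chapter.length ≤ 1 ∨ ∀ e ∈ entities_set, PySem.Str.split₀ e ≠ [])
instance (chapter : List String) (entities_set : List String) :
    Decidable (Pre_extract_conns_with_entities chapter entities_set) := by
  unfold Pre_extract_conns_with_entities; infer_instance

def pvWitness_extract_conns_with_entities : List String × List String :=
  (["title", "Alice met Bob.", "bob and alice again"], ["Alice", "Bob"])

def Spec_extract_conns_with_entities (chapter : List String) (entities_set : List String)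
    (out : List (String × List (String × Int))) : Prop :=
  out = extract_conns_with_entities_alt chapter entities_set
instance (chapter : List String) (entities_set : List String)
    (out : List (String × List (String × Int))) :
    Decidable (Spec_extract_conns_with_entities chapter entities_set out) := by
  unfold Spec_extract_conns_with_entities; infer_instance

-- ===== CLAIM (what is proved, stated in full; the proofs are below) =====
def Claim_equal_extract_conns_with_entities : Prop :=
  ∀ (chapter : List String) (entities_set : List String),
    Dom_extract_conns_with_entities chapter entities_set →
    Pre_extract_conns_with_entities chapter entities_set →
    Spec_extract_conns_with_entities chapter entities_set
      (extract_conns_with_entities chapter entities_set)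

-- ===== LEMMAS AND PROOFS =====

-- single-direction normal forms of the two loop bodies
def pvBump1 (c : PySem.Dict String (PySem.Dict String Int)) (p : String × String) :
    PySem.Dict String (PySem.Dict String Int) :=
  c.insert p.1 ((c.getD p.1 PySem.Dict.empty).modify p.2 0 (· + 1))

def pvAssign1 (c : PySem.Dict String (PySem.Dict String Int)) (t : (String × String) × Int) :
    PySem.Dict String (PySem.Dict String Int) :=
  c.insert t.1.1 ((c.getD t.1.1 PySem.Dict.empty).insert t.1.2 t.2)

-- the ordered-pair stream of one paragraph's deduplicated entity list
def pvPairs (ent : List String) : List (String × String) :=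
  (PySem.List.pyRange 0 (ent.length : Int) 1).flatMap (fun i =>
    (PySem.List.pyRange (i + 1) (ent.length : Int) 1).map (fun j =>
      (PySem.List.pyGetD ent i "", PySem.List.pyGetD ent j "")))

-- the full directed pair stream of the chapter
def pvQs (entities : List (List String × String)) : List (String × String) :=
  entities.flatMap (fun pair =>
    (pvPairs (PySem.List.dedup pair.1)).flatMap (fun p => [p, p.swap]))

lemma pvBumpA_eq_bump1 (c : PySem.Dict String (PySem.Dict String Int)) (a b : String) :
    pvBumpA c a b = pvBump1 c (a, b) := by
  unfold pvBumpA pvBump1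
  by_cases ha : c.contains a = true
  · simp only [ha, if_pos]
    by_cases hb : (c.getD a PySem.Dict.empty).contains b = true
    · simp [hb]
    · simp only [Bool.not_eq_true] at hb
      simp only [hb, Bool.false_eq_true, if_false]
      have h0 : ((c.getD a PySem.Dict.empty).insert b 0).modify b 0 (· + 1)
          = (c.getD a PySem.Dict.empty).modify b 0 (· + 1) := by
        simp [PySem.Dict.modify, PySem.Dict.getD_insert_self, PySem.Dict.insert_insert_self,
          PySem.Dict.getD_of_not_contains _ _ hb]
      rw [h0]
  · simp only [Bool.not_eq_true] at ha
    simp only [ha, Bool.false_eq_true, if_false]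
    rw [PySem.Dict.getD_insert_self, PySem.Dict.getD_of_not_contains _ _ ha,
      PySem.Dict.insert_insert_self]
    have h1 : ((PySem.Dict.empty : PySem.Dict String Int).contains b) = false := by
      simp [PySem.Dict.contains_empty]
    simp only [h1, Bool.false_eq_true, if_false]
    simp [PySem.Dict.modify, PySem.Dict.getD_insert_self, PySem.Dict.insert_insert_self,
      PySem.Dict.getD_of_not_contains _ _ h1]

lemma pvAssign_eq_assign1 (c : PySem.Dict String (PySem.Dict String Int))
    (t : (String × String) × Int) :
    (let c1 := c.setdefault t.1.1 PySem.Dict.empty;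
     c1.insert t.1.1 ((c1.getD t.1.1 PySem.Dict.empty).insert t.1.2 t.2)) = pvAssign1 c t := by
  unfold pvAssign1
  by_cases h : c.contains t.1.1 = true
  · simp [PySem.Dict.setdefault_of_contains _ _ h]
  · simp only [Bool.not_eq_true] at h
    rw [PySem.Dict.setdefault_of_not_contains _ _ h]
    simp [PySem.Dict.getD_insert_self, PySem.Dict.insert_insert_self,
      PySem.Dict.getD_of_not_contains _ _ h]

lemma pvPairs_short (ent : List String) (h : ent.length ≤ 1) : pvPairs ent = [] := by
  unfold pvPairs
  match ent, h with
  | [], _ => rfl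
  | [x], _ =>
    simp
    intro i h0 h1
    have hi : i = 0 := by omega
    subst hi
    decide

-- grouped characterisation of a fold of per-key updates from the empty dict
lemma pv_groupFold_items {I ν : Type} {K : Type} [BEq K] [LawfulBEq K]
    (key : I → K) (φ : I → ν → ν) (e : ν) (l : List I) :
    (l.foldl (fun c t => c.insert (key t) (φ t (c.getD (key t) e)))
        (PySem.Dict.empty : PySem.Dict K ν)).items
      = (PySem.Set.ofList (l.map key)).map (fun a =>
          (a, (l.filter (fun t => key t == a)).foldl (fun x t => φ t x) e)) := by
  induction l using List.reverseRecOn with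
  | nil => rfl
  | append_singleton l t ih =>
    rw [List.foldl_append]
    set d := l.foldl (fun c t => c.insert (key t) (φ t (c.getD (key t) e)))
        (PySem.Dict.empty : PySem.Dict K ν) with hd
    have hkeys : d.keys = PySem.Set.ofList (l.map key) := by
      simp [PySem.Dict.keys, ih, Function.comp_def]
    have hnodup : d.keys.Nodup := by rw [hkeys]; exact PySem.Set.nodup_ofList _
    have hcont : d.contains (key t) = true ↔ key t ∈ l.map key := by
      rw [PySem.Dict.contains_iff_mem_keys, hkeys, PySem.Set.mem_ofList]
    have hgetD : d.getD (key t) e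
        = (l.filter (fun s => key s == key t)).foldl (fun x s => φ s x) e := by
      by_cases hm : key t ∈ l.map key
      · have hmem : (key t, (l.filter (fun s => key s == key t)).foldl (fun x s => φ s x) e)
            ∈ d.items := by
          rw [ih]
          exact List.mem_map.mpr ⟨key t, (PySem.Set.mem_ofList _ _).mpr hm, rfl⟩
        exact PySem.Dict.getD_of_mem_items _ hmem hnodup e
      · have hc : d.contains (key t) = false := by
          rw [← Bool.not_eq_true, hcont]; exact hm
        rw [PySem.Dict.getD_of_not_contains _ _ hc]
        have : l.filter (fun s => key s == key t) = [] := by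
          rw [List.filter_eq_nil_iff]
          intro s hs hbeq
          exact hm (List.mem_map.mpr ⟨s, hs, by simpa using hbeq⟩)
        rw [this]; rfl
    simp only [List.foldl_cons, List.foldl_nil]
    by_cases hm : key t ∈ l.map key
    · have hc : d.contains (key t) = true := hcont.mpr hm
      have houter : PySem.Set.ofList ((l ++ [t]).map key) = PySem.Set.ofList (l.map key) := by
        rw [List.map_append, List.map_singleton, PySem.Set.ofList_append_singleton]
        unfold PySem.Set.add
        rw [(PySem.Set.contains_iff _ _).mpr ((PySem.Set.mem_ofList _ _).mpr hm)]
        simp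
      rw [houter, PySem.Dict.items_insert_of_contains _ _ hc, ih, List.map_map]
      apply List.map_congr_left
      intro a _
      by_cases hak : a = key t
      · subst hak
        simp only [Function.comp_apply, beq_self_eq_true, if_pos]
        rw [List.filter_append, List.foldl_append, hgetD]
        simp
      · have hne : (a == key t) = false := by simpa using hak
        simp only [Function.comp_apply, hne, Bool.false_eq_true, if_false]
        rw [List.filter_append]
        have : [t].filter (fun s => key s == a) = [] := by
          simp [show (key t == a) = false by simpa using fun h => hak h.symm]
        rw [this, List.append_nil]
    · have hc : d.contains (key t) = false := by rw [← Bool.not_eq_true, hcont]; exact hm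
      have houter : PySem.Set.ofList ((l ++ [t]).map key)
          = PySem.Set.ofList (l.map key) ++ [key t] := by
        rw [List.map_append, List.map_singleton, PySem.Set.ofList_append_singleton]
        unfold PySem.Set.add
        have : (PySem.Set.ofList (l.map key)).contains (key t) = false := by
          rw [← Bool.not_eq_true]
          intro h
          exact hm ((PySem.Set.mem_ofList _ _).mp ((PySem.Set.contains_iff _ _).mp h))
        rw [this]
        simp
      rw [houter, PySem.Dict.items_insert_of_not_contains _ _ hc, ih, List.map_append]
      congr 1
      · apply List.map_congr_left
        intro a ha
        rw [List.filter_append]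
        have : [t].filter (fun s => key s == a) = [] := by
          have hane : (key t == a) = false := by
            simp only [beq_eq_false_iff_ne, ne_eq]
            intro h
            exact hm (by rw [h]; exact (PySem.Set.mem_ofList _ _).mp ha)
          simp [hane]
        rw [this, List.append_nil]
      · simp only [List.map_singleton]
        rw [List.filter_append, List.foldl_append, hgetD]
        have hnil : l.filter (fun s => key s == key t) = [] := by
          rw [List.filter_eq_nil_iff]
          intro s hs hbeq
          exact hm (List.mem_map.mpr ⟨s, hs, by simpa using hbeq⟩)
        simp [hnil]

lemma pv_discard_eq_filter {α : Type} [BEq α] (s : List α) (x : α) :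
    PySem.Set.discard s x = s.filter (fun y => !(y == x)) := rfl

lemma pv_ofList_filter {α : Type} [BEq α] [LawfulBEq α] (p : α → Bool) (l : List α) :
    PySem.Set.ofList (l.filter p) = (PySem.Set.ofList l).filter p := by
  induction l with
  | nil => rfl
  | cons x l ih =>
    rw [PySem.Set.ofList_cons, List.filter_cons]
    by_cases hp : p x = true
    · rw [if_pos hp, PySem.Set.ofList_cons, List.filter_cons, if_pos hp, ih,
        pv_discard_eq_filter, pv_discard_eq_filter, List.filter_comm]
    · have hp' : p x = false := by simpa using hp
      rw [if_neg (by simp [hp']), List.filter_cons, if_neg (by simp [hp']), ih,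
        pv_discard_eq_filter, List.filter_comm]
      symm
      rw [List.filter_eq_self]
      intro y hy
      simp only [Bool.not_eq_eq_eq_not, Bool.not_true, beq_eq_false_iff_ne, ne_eq]
      intro h
      subst h
      rw [List.mem_filter] at hy
      exact absurd hy.2 (by simp [hp'])

lemma pv_ofList_map_injOn {α β : Type} [BEq α] [LawfulBEq α] [BEq β] [LawfulBEq β]
    (f : α → β) (l : List α) (h : ∀ x ∈ l, ∀ y ∈ l, f x = f y → x = y) :
    PySem.Set.ofList (l.map f) = (PySem.Set.ofList l).map f := by
  induction l with
  | nil => rfl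
  | cons x l ih =>
    rw [List.map_cons, PySem.Set.ofList_cons, PySem.Set.ofList_cons, List.map_cons]
    congr 1
    rw [ih (fun a ha b hb => h a (List.mem_cons_of_mem _ ha) b (List.mem_cons_of_mem _ hb)),
      pv_discard_eq_filter, pv_discard_eq_filter, List.filter_map]
    congr 1
    apply List.filter_congr
    intro y hy
    have hyl : y ∈ l := (PySem.Set.mem_ofList _ _).mp hy
    have hbeq : (f y == f x) = (y == x) := by
      by_cases hyx : y = x
      · simp [hyx]
      · have hfne : f y ≠ f x :=
          fun heq => hyx (h y (List.mem_cons_of_mem _ hyl) x List.mem_cons_self heq)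
        simp [hyx, hfne]
    simp [hbeq]

lemma pv_discard_swap {α : Type} [BEq α] (s : List α) (a b : α) :
    PySem.Set.discard (PySem.Set.discard s a) b = PySem.Set.discard (PySem.Set.discard s b) a := by
  simp only [pv_discard_eq_filter, List.filter_comm]

lemma pv_discard_discard_self {α : Type} [BEq α] (s : List α) (a : α) :
    PySem.Set.discard (PySem.Set.discard s a) a = PySem.Set.discard s a := by
  simp only [pv_discard_eq_filter, List.filter_filter, Bool.and_self]

lemma pv_discard_cons {α : Type} [BEq α] [LawfulBEq α] (s : List α) (x y : α) :
    PySem.Set.discard (x :: s) y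
      = if x == y then PySem.Set.discard s y else x :: PySem.Set.discard s y := by
  simp only [pv_discard_eq_filter, List.filter_cons]
  by_cases h : x == y
  · simp [h]
  · simp [h]

lemma pv_ofList_discard_map {α β : Type} [BEq α] [LawfulBEq α] [BEq β] [LawfulBEq β]
    (f : α → β) (s : List α) (x : α) :
    PySem.Set.discard (PySem.Set.ofList ((PySem.Set.discard s x).map f)) (f x)
      = PySem.Set.discard (PySem.Set.ofList (s.map f)) (f x) := by
  induction s with
  | nil => rfl
  | cons y s ih =>
    rw [pv_discard_cons, List.map_cons, PySem.Set.ofList_cons]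
    by_cases hyx : y == x
    · have : f y = f x := by rw [(by simpa using hyx : y = x)]
      rw [if_pos hyx, this, pv_discard_cons, if_pos (by simp), pv_discard_discard_self, ih]
    · rw [if_neg (by simp_all), List.map_cons, PySem.Set.ofList_cons]
      by_cases hf : f y == f x
      · have hfe : f y = f x := by simpa using hf
        rw [pv_discard_cons, if_pos hf, pv_discard_cons, if_pos hf, hfe,
          pv_discard_discard_self, pv_discard_discard_self, ih]
      · rw [pv_discard_cons, if_neg (by simp_all), pv_discard_cons, if_neg (by simp_all)]
        congr 1
        rw [pv_discard_swap, ih, pv_discard_swap]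

lemma pv_ofList_map_ofList {α β : Type} [BEq α] [LawfulBEq α] [BEq β] [LawfulBEq β]
    (f : α → β) (l : List α) :
    PySem.Set.ofList ((PySem.Set.ofList l).map f) = PySem.Set.ofList (l.map f) := by
  induction l with
  | nil => rfl
  | cons x l ih =>
    rw [PySem.Set.ofList_cons, List.map_cons, List.map_cons, PySem.Set.ofList_cons,
      PySem.Set.ofList_cons]
    congr 1
    rw [pv_ofList_discard_map, ih]

-- A's nested-dict fold and B's one-shot assignment fold over the deduped event list agree
lemma pv_main (qs : List (String × String)) :
    (qs.foldl pvBump1 PySem.Dict.empty).items.map (fun p => (p.1, p.2.items))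
      = (((PySem.Dict.counter qs).items.foldl pvAssign1 PySem.Dict.empty).items.map
          (fun p => (p.1, p.2.items))) := by
  have hA : (qs.foldl pvBump1 PySem.Dict.empty).items
      = (PySem.Set.ofList (qs.map (fun p : String × String => p.1))).map (fun a =>
          (a, (qs.filter (fun p : String × String => p.1 == a)).foldl
            (fun x p => x.modify p.2 0 (· + 1)) (PySem.Dict.empty : PySem.Dict String Int))) :=
    pv_groupFold_items (K := String) (fun p : String × String => p.1)
      (fun (p : String × String) (inner : PySem.Dict String Int) => inner.modify p.2 0 (· + 1))
      PySem.Dict.empty qs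
  have hB : ((PySem.Dict.counter qs).items.foldl pvAssign1 PySem.Dict.empty).items
      = (PySem.Set.ofList ((PySem.Dict.counter qs).items.map
          (fun t : (String × String) × Int => t.1.1))).map (fun a =>
          (a, ((PySem.Dict.counter qs).items.filter
              (fun t : (String × String) × Int => t.1.1 == a)).foldl
            (fun x t => x.insert t.1.2 t.2) (PySem.Dict.empty : PySem.Dict String Int))) :=
    pv_groupFold_items (K := String) (fun t : (String × String) × Int => t.1.1)
      (fun (t : (String × String) × Int) (inner : PySem.Dict String Int) =>
        inner.insert t.1.2 t.2)
      PySem.Dict.empty ((PySem.Dict.counter qs).items)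
  rw [hA, hB, List.map_map, List.map_map]
  have houter : PySem.Set.ofList (((PySem.Dict.counter qs).items).map
        (fun t : (String × String) × Int => t.1.1))
      = PySem.Set.ofList (qs.map (fun p : String × String => p.1)) := by
    rw [PySem.Dict.items_counter, List.map_map]
    exact pv_ofList_map_ofList _ _
  rw [houter]
  apply List.map_congr_left
  intro a ha
  simp only [Function.comp_apply]
  congr 1
  have hL : (qs.filter (fun p : String × String => p.1 == a)).foldl
        (fun x p => x.modify p.2 0 (· + 1)) (PySem.Dict.empty : PySem.Dict String Int)
      = PySem.Dict.counter ((qs.filter (fun p : String × String => p.1 == a)).map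
          (fun p => p.2)) := by
    rw [PySem.Dict.counter_eq_foldl, List.foldl_map]
  have hFlt : ((PySem.Dict.counter qs).items).filter
        (fun t : (String × String) × Int => t.1.1 == a)
      = ((PySem.Set.ofList qs).filter (fun k => k.1 == a)).map
          (fun k => (k, (List.count k qs : Int))) := by
    rw [PySem.Dict.items_counter, List.filter_map]
    rfl
  have hnodupF : ((PySem.Set.ofList qs).filter (fun k => k.1 == a)).Nodup :=
    (PySem.Set.nodup_ofList qs).filter _
  have hR : ((((PySem.Dict.counter qs).items).filter
        (fun t : (String × String) × Int => t.1.1 == a)).foldl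
        (fun x t => x.insert t.1.2 t.2) (PySem.Dict.empty : PySem.Dict String Int)).items
      = ((PySem.Set.ofList qs).filter (fun k => k.1 == a)).map
          (fun k => (k.2, (List.count k qs : Int))) := by
    rw [hFlt, List.foldl_map]
    have := PySem.Dict.items_foldl_insert_fresh
        ((PySem.Set.ofList qs).filter (fun k => k.1 == a))
        (fun k : String × String => k.2) (fun k => (List.count k qs : Int))
        (PySem.Dict.empty : PySem.Dict String Int)
        (fun _ _ => by simp [PySem.Dict.contains_empty])
        (by
          apply List.Nodup.map_on _ hnodupF
          intro x hx y hy hxy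
          rw [List.mem_filter] at hx hy
          have hx1 : x.1 = a := by simpa using hx.2
          have hy1 : y.1 = a := by simpa using hy.2
          exact Prod.ext (hx1.trans hy1.symm) hxy)
    simpa using this
  rw [hL, hR, PySem.Dict.items_counter]
  have hys : PySem.Set.ofList ((qs.filter (fun p : String × String => p.1 == a)).map
        (fun p => p.2))
      = ((PySem.Set.ofList qs).filter (fun k => k.1 == a)).map (fun k => k.2) := by
    rw [pv_ofList_map_injOn _ _ (by
        intro x hx y hy hxy
        rw [List.mem_filter] at hx hy
        have hx1 : x.1 = a := by simpa using hx.2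
        have hy1 : y.1 = a := by simpa using hy.2
        exact Prod.ext (hx1.trans hy1.symm) hxy),
      pv_ofList_filter]
  rw [hys, List.map_map]
  apply List.map_congr_left
  intro k hk
  rw [List.mem_filter] at hk
  have hk1 : k.1 = a := by simpa using hk.2
  simp only [Function.comp_apply]
  congr 1
  have : List.count k.2 ((qs.filter (fun p : String × String => p.1 == a)).map (fun p => p.2))
      = List.count k qs := by
    rw [List.count_eq_countP, List.countP_map, List.countP_filter, List.count_eq_countP]
    apply List.countP_congr
    intro q _
    constructor
    · intro h
      simp only [Function.comp_apply, Bool.and_eq_true, beq_iff_eq] at h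
      have : q = k := Prod.ext (h.2.trans hk1.symm) h.1
      simp [this]
    · intro h
      have hq : q = k := by simpa using h
      subst hq
      simp [hk1]
  rw [this]

-- reshaping A's nested index loops onto the pair stream
lemma pv_hpairs {γ : Type} (ent : List String) (g : γ → String × String → γ) (c : γ) :
    (PySem.List.pyRange 0 (ent.length : Int) 1).foldl (fun c i =>
      (PySem.List.pyRange (i + 1) (ent.length : Int) 1).foldl (fun c j =>
        g c (PySem.List.pyGetD ent i "", PySem.List.pyGetD ent j "")) c) c
      = (pvPairs ent).foldl g c := by
  rw [pvPairs, List.foldl_flatMap]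
  simp only [List.foldl_map]

-- B's enumerate/slice comprehension over one entity list = the doubled pair stream of that list
lemma pv_entEv (ent : List String) :
    (PySem.List.enumerate ent).flatMap (fun ia =>
      (PySem.List.slice ent (some (ia.1 + 1)) none).flatMap (fun b =>
        [(ia.2, b), (b, ia.2)]))
      = (pvPairs ent).flatMap (fun p => [p, p.swap]) := by
  rw [PySem.List.enumerate_eq_map_pyRange ent "", List.flatMap_map, pvPairs,
    List.flatMap_assoc, PySem.List.len_eq]
  apply List.flatMap_congr
  intro i hi
  have h0i : 0 ≤ i := ((PySem.List.mem_pyRange_one).mp hi).1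
  have hsl : PySem.List.slice ent (some (i + 1)) none = List.drop (i + 1).toNat ent :=
    PySem.List.slice_from ent (by omega)
  have hmap : (PySem.List.pyRange (i + 1) ((ent.length : Int)) 1).map
      (fun j => PySem.List.pyGetD ent j "") = List.drop (i + 1).toNat ent := by
    have := PySem.List.map_pyGetD_pyRange ent "" (a := i + 1) (by omega)
    rwa [PySem.List.len_eq] at this
  dsimp only
  rw [hsl, ← hmap, List.flatMap_map, List.flatMap_map]
  apply List.flatMap_congr
  intro j _
  simp [Prod.swap]

-- dropping a flatMap's nil-producing elements (A's emptiness filter is a no-op on the stream)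
lemma pv_flatMap_filter {α β : Type} (p : α → Bool) (f : α → List β) (l : List α)
    (h : ∀ x, p x = false → f x = []) :
    (l.filter p).flatMap f = l.flatMap f := by
  induction l with
  | nil => rfl
  | cons x l ih =>
    rw [List.filter_cons]
    by_cases hp : p x = true
    · rw [if_pos hp, List.flatMap_cons, List.flatMap_cons, ih]
    · have hp' : p x = false := by simpa using hp
      rw [if_neg (by simp [hp']), List.flatMap_cons, h x hp', List.nil_append, ih]

lemma pv_ports_eq (chapter : List String) (entities_set : List String) :
    extract_conns_with_entities chapter entities_set
      = extract_conns_with_entities_alt chapter entities_set := by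
  simp only [extract_conns_with_entities, extract_conns_with_entities_alt]
  set paragraphs := PySem.List.slice chapter (some 1) none with hpar
  set F : String → List String := fun p => entities_set.filter (fun e =>
      PySem.Str.isIn (PySem.Str.lower ((PySem.Str.split₀ e).headD ""))
        (PySem.Str.lower p)) with hF
  set entities : List (List String × String) :=
      (paragraphs.map (fun p => (F p, p))).filter (fun pair => pair.1.length != 0) with hent
  -- A's fold is the pvBump1 fold over the directed pair stream pvQs entities
  have hA : entities.foldl (fun connections pair =>
      let entity : List String := PySem.Set.ofList pair.1
      if entity.length ≤ 1 then connections
      else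
        (PySem.List.pyRange 0 (entity.length : Int) 1).foldl (fun connections ind =>
          (PySem.List.pyRange (ind + 1) (entity.length : Int) 1).foldl (fun connections other_ind =>
            let a := PySem.List.pyGetD entity ind ""
            let b := PySem.List.pyGetD entity other_ind ""
            pvBumpA (pvBumpA connections a b) b a) connections) connections)
      (PySem.Dict.empty : PySem.Dict String (PySem.Dict String Int))
      = (pvQs entities).foldl pvBump1 PySem.Dict.empty := by
    rw [pvQs, List.foldl_flatMap]
    congr 1
    funext c pair
    rw [List.foldl_flatMap]
    rw [PySem.List.dedup_eq_ofList]
    set ent : List String := PySem.Set.ofList pair.1 with hent'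
    by_cases hlen : ent.length ≤ 1
    · rw [if_pos hlen, pvPairs_short ent hlen]
      rfl
    · rw [if_neg hlen,
        pv_hpairs ent (fun c p => pvBumpA (pvBumpA c p.1 p.2) p.2 p.1) c]
      apply PySem.List.foldl_congr_mem
      intro c p _
      simp only [List.foldl_cons, List.foldl_nil, pvBumpA_eq_bump1, Prod.swap]
  -- B's event list IS pvQs entities
  have hEv : (paragraphs.map (fun p => PySem.List.dedup (F p))).flatMap (fun ent =>
        (PySem.List.enumerate ent).flatMap (fun ia =>
          (PySem.List.slice ent (some (ia.1 + 1)) none).flatMap (fun b =>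
            [(ia.2, b), (b, ia.2)])))
      = pvQs entities := by
    rw [pvQs, hent,
      pv_flatMap_filter _ _ _ (by
        intro x hx
        have hnil : x.1 = [] := by
          cases h1 : x.1 with
          | nil => rfl
          | cons y ys => rw [h1] at hx; simp at hx
        rw [hnil]
        rfl),
      List.flatMap_map, List.flatMap_map]
    apply List.flatMap_congr
    intro p _
    exact pv_entEv (PySem.List.dedup (F p))
  rw [hA, ← hEv]
  set events := (paragraphs.map (fun p => PySem.List.dedup (F p))).flatMap (fun ent =>
        (PySem.List.enumerate ent).flatMap (fun ia =>
          (PySem.List.slice ent (some (ia.1 + 1)) none).flatMap (fun b =>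
            [(ia.2, b), (b, ia.2)]))) with hev
  -- B's assignment fold is the pvAssign1 fold over the counter's items
  have hBody : (fun (connections : PySem.Dict String (PySem.Dict String Int))
        (pr : String × String) =>
          let connections := connections.setdefault pr.1 PySem.Dict.empty
          connections.insert pr.1
            ((connections.getD pr.1 PySem.Dict.empty).insert pr.2
              ((PySem.List.count events (pr.1, pr.2) : Int))))
      = (fun c pr => pvAssign1 c (pr, (PySem.List.count events (pr.1, pr.2) : Int))) := by
    funext c pr
    exact pvAssign_eq_assign1 c (pr, (PySem.List.count events (pr.1, pr.2) : Int))
  have hFold : (PySem.List.dedup events).foldl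
        (fun c pr => pvAssign1 c (pr, (PySem.List.count events (pr.1, pr.2) : Int)))
        (PySem.Dict.empty : PySem.Dict String (PySem.Dict String Int))
      = ((PySem.List.dedup events).map (fun pr : String × String =>
          (pr, (PySem.List.count events (pr.1, pr.2) : Int)))).foldl pvAssign1
        (PySem.Dict.empty : PySem.Dict String (PySem.Dict String Int)) :=
    (List.foldl_map).symm
  rw [hBody, hFold]
  have hMap : (PySem.List.dedup events).map (fun pr : String × String =>
        (pr, (PySem.List.count events (pr.1, pr.2) : Int)))
      = (PySem.Dict.counter events).items := by
    rw [PySem.Dict.items_counter, PySem.List.dedup_eq_ofList]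
    apply List.map_congr_left
    intro k _
    rw [PySem.List.count_eq]
  rw [hMap]
  exact pv_main events

-- ===== VERDICT (by name: the statement is the Claim_ definition above) =====
theorem extract_conns_with_entities_spec : Claim_equal_extract_conns_with_entities := by
  intro chapter entities_set _ _
  unfold Spec_extract_conns_with_entities
  exact pv_ports_eq chapter entities_set
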